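-- pv_equiv track=rewrite | github.com/Tedfulk/advent_of_code | 2023/1D/trebucknet.py | find_spelled_out_numbers
-- ===== SOURCE A (Python) =====
-- def find_spelled_out_numbers(s: str, digit_mapping: dict):
--     """Returns a list of tuples containing the start index, end index, and corresponding digit
--     for each spelled-out number found in the string.
--     """
--     matches = []
--     length = len(s)
--     for index in range(length):
--         for word, digit in digit_mapping.items():
--             word_len = len(word)
--             # slice the string from the current index to the current index + the length of the word and check if it matches the word in the dict
--             if s[index : index + word_len] == word:
--                 # Store the start index, end index, and the digit
--                 matches.append((index, index + word_len, digit))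
--                 break
--     return matches
-- ===== SOURCE B (Python) =====
-- def find_spelled_out_numbers(s: str, digit_mapping: dict):
--     """Word-major rewrite: for each word collect all its occurrence starts with
--     repeated str.find (skipping the quadratic index-by-index slicing); a dict
--     keyed by start keeps only the first-in-dict-order word per position, and
--     sorting by start restores the ascending output order."""
--     n = len(s)
--     best = {}
--     for word, digit in digit_mapping.items():
--         pos = s.find(word)
--         while pos != -1 and pos < n:
--             if pos not in best:
--                 best[pos] = (pos, pos + len(word), digit)
--             pos = s.find(word, pos + 1)
--     return sorted(best.values(), key=lambda t: t[0])
-- ===== Notes on version B (the rewrite author's own statement) =====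
-- stated objective: faster
-- what changed: A scans every index and slices every word there (index-major double loop); B is word-major: for each mapping word it collects all occurrence starts with repeated str.find, keeps only the first-in-dict-order word per start in a dict, and sorts the collected triples by start index.
import Mathlib
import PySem

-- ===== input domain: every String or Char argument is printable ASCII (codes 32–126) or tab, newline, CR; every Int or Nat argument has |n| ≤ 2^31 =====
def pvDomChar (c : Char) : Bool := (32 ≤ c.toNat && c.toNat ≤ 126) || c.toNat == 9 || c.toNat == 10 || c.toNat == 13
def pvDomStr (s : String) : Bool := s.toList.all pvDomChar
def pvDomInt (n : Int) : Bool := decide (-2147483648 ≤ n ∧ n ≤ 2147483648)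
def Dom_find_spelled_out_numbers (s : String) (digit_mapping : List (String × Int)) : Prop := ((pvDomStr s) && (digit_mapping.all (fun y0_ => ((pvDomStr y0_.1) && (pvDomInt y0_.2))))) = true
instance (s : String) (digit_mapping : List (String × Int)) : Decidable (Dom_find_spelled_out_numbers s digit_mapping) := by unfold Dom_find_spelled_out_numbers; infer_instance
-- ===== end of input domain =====

-- B replaces A's index-by-index scan (slicing every word at every position) by a word-major
-- pass: repeated str.find collects each word's occurrences, a dict keyed by start keeps the
-- first-in-dict-order word per position, and a final sort by start restores A's output order.

-- ===== PORT A =====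
-- A's inner 'for word, digit in digit_mapping.items(): … break' loop
def pvInnerA (cs : List Char) (index : Int) : List (String × Int) → List (Int × Int × Int) → List (Int × Int × Int)
  | [], acc => acc
  | (word, digit) :: rest, acc =>
    if PySem.List.slice cs (some index) (some (index + PySem.Str.len word)) = word.toList
    then acc ++ [(index, index + PySem.Str.len word, digit)]
    else pvInnerA cs index rest acc

def find_spelled_out_numbers (s : String) (digit_mapping : List (String × Int)) : List (Int × Int × Int) :=
  (PySem.List.pyRange 0 (PySem.Str.len s) 1).foldl
    (fun acc index => pvInnerA s.toList index (PySem.Dict.ofList digit_mapping).items acc) []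

-- ===== PORT B =====
-- body of B's 'if pos not in best: best[pos] = (pos, pos + len(word), digit)'
def pvStep (w : List Char) (d : Int) (best : PySem.Dict Int (Int × Int × Int)) (i : Nat) :
    PySem.Dict Int (Int × Int × Int) :=
  if best.contains (i : Int) then best
  else best.insert (i : Int) ((i : Int), (i : Int) + (w.length : Int), d)

-- the 'pos != -1' half of the while test on a find result (find results are ≥ -1;
-- none encodes pos == -1)
def pvOptPos (r : Int) : Option Nat := if r = -1 then none else some r.toNat

-- B's 'while pos != -1 and pos < n: …' loop; the 'pos < n' half of the test is the
-- 'i < cs.length' branch below, 'pos = s.find(word, pos + 1)' is the findFrom call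
def pvLoopB (cs w : List Char) (d : Int) (best : PySem.Dict Int (Int × Int × Int)) :
    Option Nat → PySem.Dict Int (Int × Int × Int)
  | none => best
  | some i =>
    if h : i < cs.length then
      pvLoopB cs w d (pvStep w d best i) (pvOptPos (PySem.Chars.findFrom cs w ((i : Int) + 1)))
    else best
  termination_by posO => match posO with | none => 0 | some i => cs.length + 1 - i
  decreasing_by
    have h2 : i + 1 ≤ cs.length := h
    rcases hq : pvOptPos (PySem.Chars.findFrom cs w ((i : Int) + 1)) with _ | i'
    · show 0 < cs.length + 1 - i
      omega
    · have hr : PySem.Chars.findFrom cs w ((i : Int) + 1) ≠ -1 := by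
        intro hc; simp [pvOptPos, hc] at hq
      have hcast : ((i : Int) + 1) = ((i + 1 : Nat) : Int) := by push_cast; ring
      have hspec := (PySem.Chars.findFrom_natCast_spec cs w (i + 1) h2 (by rw [← hcast]; exact hr)).1
      rw [← hcast] at hspec
      have hi' : i' = (PySem.Chars.findFrom cs w ((i : Int) + 1)).toNat := by
        simp [pvOptPos, hr] at hq; omega
      show cs.length + 1 - i' < cs.length + 1 - i
      omega

-- one word's pass: 'pos = s.find(word)' then the while loop
def pvWordB (cs : List Char) (best : PySem.Dict Int (Int × Int × Int)) (p : String × Int) :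
    PySem.Dict Int (Int × Int × Int) :=
  pvLoopB cs p.1.toList p.2 best (pvOptPos (PySem.Chars.find cs p.1.toList))

def find_spelled_out_numbers_alt (s : String) (digit_mapping : List (String × Int)) : List (Int × Int × Int) :=
  PySem.List.sorted
    (((PySem.Dict.ofList digit_mapping).items.foldl (pvWordB s.toList) PySem.Dict.empty).values)
    (fun t => t.1)

-- ===== PRECONDITION & SPEC =====
def Spec_find_spelled_out_numbers (s : String) (digit_mapping : List (String × Int)) (out : List (Int × Int × Int)) : Prop := out = find_spelled_out_numbers_alt s digit_mapping
instance (s : String) (digit_mapping : List (String × Int)) (out : List (Int × Int × Int)) : Decidable (Spec_find_spelled_out_numbers s digit_mapping out) := by unfold Spec_find_spelled_out_numbers; infer_instance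

-- ===== CLAIM (what is proved, stated in full; the proofs are below) =====
def Claim_equal_find_spelled_out_numbers : Prop := ∀ (s : String) (digit_mapping : List (String × Int)), Dom_find_spelled_out_numbers s digit_mapping → Spec_find_spelled_out_numbers s digit_mapping (find_spelled_out_numbers s digit_mapping)

-- ===== LEMMAS AND PROOFS =====

-- does word w occur at position i of cs?
def pvMatch (cs w : List Char) (i : Nat) : Bool := decide (w <+: cs.drop i)

-- occurrence positions of w at or after k, ascending
def pvOcc (cs w : List Char) (k : Nat) : List Nat :=
  (List.range cs.length).filter (fun i => decide (k ≤ i) && pvMatch cs w i)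

-- first entry of l whose word matches at i
def pvFirst (cs : List Char) (l : List (String × Int)) (i : Nat) : Option (String × Int) :=
  l.find? (fun p => pvMatch cs p.1.toList i)

def pvTriple (i : Nat) (p : String × Int) : Int × Int × Int :=
  ((i : Int), (i : Int) + (p.1.toList.length : Int), p.2)

-- what B's dict lookup returns, stated directly on the input
def pvLook (cs : List Char) (l : List (String × Int)) (x : Int) : Option (Int × Int × Int) :=
  (l.find? (fun p => decide (0 ≤ x) && decide (x < (cs.length : Int)) && pvMatch cs p.1.toList x.toNat)).map
    (fun p => (x, x + (p.1.toList.length : Int), p.2))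

-- indices at which some word of l matches
def pvIdx (cs : List Char) (l : List (String × Int)) : List Nat :=
  (List.range cs.length).filter (fun i => (pvFirst cs l i).isSome)

-- A's result in normal form
def pvAList (cs : List Char) (l : List (String × Int)) : List (Int × Int × Int) :=
  (List.range cs.length).flatMap (fun i => ((pvFirst cs l i).map (pvTriple i)).toList)

theorem pvInnerA_eq (cs : List Char) (i : Nat) (l : List (String × Int)) (acc : List (Int × Int × Int)) :
    pvInnerA cs (i : Int) l acc = acc ++ ((pvFirst cs l i).map (pvTriple i)).toList := by
  induction l with
  | nil => simp [pvInnerA, pvFirst]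
  | cons p rest ih =>
    obtain ⟨word, digit⟩ := p
    have hcond : (PySem.List.slice cs (some (i:Int)) (some ((i:Int) + PySem.Str.len word)) = word.toList)
        ↔ pvMatch cs word.toList i = true := by
      rw [PySem.Str.len_eq, PySem.List.slice_natCast_add]
      simp only [pvMatch, decide_eq_true_iff]
      constructor
      · intro h; exact h ▸ List.take_prefix _ _
      · intro h
        have := List.prefix_iff_eq_take.mp h
        simpa [List.take_drop] using this.symm
    by_cases hm : pvMatch cs word.toList i = true
    · rw [pvInnerA, if_pos (hcond.mpr hm)]
      simp [pvFirst, hm, pvTriple, PySem.Str.len_eq]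
    · have : ¬ (PySem.List.slice cs (some (i:Int)) (some ((i:Int) + PySem.Str.len word)) = word.toList) :=
        fun h => hm (hcond.mp h)
      simp only [pvInnerA, if_neg this, ih, pvFirst, List.find?_cons]
      simp [Bool.not_eq_true] at hm
      simp [hm]

theorem pvA_eq (s : String) (dm : List (String × Int)) :
    find_spelled_out_numbers s dm = pvAList s.toList (PySem.Dict.ofList dm).items := by
  unfold find_spelled_out_numbers pvAList
  rw [PySem.Str.len_eq, PySem.List.pyRange_zero_nat, List.foldl_map]
  rw [PySem.List.foldl_congr_mem _ _
    (fun acc i => acc ++ ((pvFirst s.toList (PySem.Dict.ofList dm).items i).map (pvTriple i)).toList) _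
    (fun acc i _ => pvInnerA_eq s.toList i (PySem.Dict.ofList dm).items acc)]
  rw [PySem.List.foldl_append_eq_flatMap]
  simp

theorem pvFoldStep_get? (w : List Char) (d : Int) (js : List Nat)
    (best : PySem.Dict Int (Int × Int × Int)) (x : Int) :
    (js.foldl (pvStep w d) best).get? x =
      match best.get? x with
      | some v => some v
      | none => if (∃ j ∈ js, (j : Int) = x) then some (x, x + (w.length : Int), d) else none := by
  induction js generalizing best with
  | nil => cases h : best.get? x <;> simp [h]
  | cons j rest ih =>
    rw [List.foldl_cons, ih]
    unfold pvStep
    by_cases hc : best.contains (j : Int) = true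
    · rw [if_pos hc]
      cases h : best.get? x with
      | some v => simp
      | none =>
        have hne : (j : Int) ≠ x := by
          intro he
          rw [PySem.Dict.contains_eq_isSome_get?, he, h] at hc; simp at hc
        simp [hne]
    · rw [if_neg hc]
      by_cases hx : (j : Int) = x
      · subst hx
        rw [PySem.Dict.get?_insert]
        have h : best.get? (j : Int) = none := by
          rw [PySem.Dict.contains_eq_isSome_get?] at hc
          cases h : best.get? (j : Int) <;> simp [h] at hc ⊢
        simp [h]
      · rw [PySem.Dict.get?_insert, if_neg (fun he => hx he.symm)]
        cases h : best.get? x with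
        | some v => simp
        | none => simp [hx]

theorem pvFoldStep_nodup (w : List Char) (d : Int) (js : List Nat)
    (best : PySem.Dict Int (Int × Int × Int)) (h : best.keys.Nodup) :
    (js.foldl (pvStep w d) best).keys.Nodup := by
  induction js generalizing best with
  | nil => exact h
  | cons j rest ih =>
    rw [List.foldl_cons]
    apply ih
    unfold pvStep
    by_cases hc : best.contains (j : Int) = true
    · rw [if_pos hc]; exact h
    · rw [if_neg hc]
      rw [PySem.Dict.keys_insert_of_not_contains _ _ (by simpa using hc)]
      refine List.Nodup.append h (List.nodup_singleton _) ?_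
      intro a ha hb
      simp at hb; subst hb
      exact hc ((PySem.Dict.contains_iff_mem_keys _ _).mpr ha)

theorem pvPrefix_drop_infix (cs w : List Char) (k i : Nat) (hk : k ≤ i)
    (h : w <+: cs.drop i) : w <:+: cs.drop k := by
  have hdd : (cs.drop k).drop (i - k) = cs.drop i := by
    rw [List.drop_drop]; congr 1; omega
  have h2 : cs.drop i <:+ cs.drop k := by rw [← hdd]; exact List.drop_suffix _ _
  exact h.isInfix.trans h2.isInfix

theorem pvOcc_nil (cs w : List Char) (k : Nat)
    (h : ∀ i, k ≤ i → i < cs.length → ¬ w <+: cs.drop i) : pvOcc cs w k = [] := by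
  rw [pvOcc, List.filter_eq_nil_iff]
  intro i hi
  simp only [List.mem_range] at hi
  simp only [Bool.and_eq_true, decide_eq_true_iff, pvMatch, not_and]
  exact fun hk => h i hk hi

theorem pvFilterCons (p q : Nat → Bool) (j₀ n : Nat) (hn : j₀ < n)
    (hpq : ∀ i, j₀ < i → p i = q i) (hp : p j₀ = true)
    (hlow : ∀ i, i ≤ j₀ → q i = false) (hplow : ∀ i, i < j₀ → p i = false) :
    (List.range n).filter p = j₀ :: (List.range n).filter q := by
  induction n with
  | zero => omega
  | succ n ih =>
    rw [List.range_succ, List.filter_append, List.filter_append]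
    by_cases hlt : j₀ < n
    · rw [ih hlt]
      have : p n = q n := hpq n hlt
      simp [List.filter, this]
    · have he : j₀ = n := by omega
      subst he
      have h1 : (List.range j₀).filter p = [] :=
        List.filter_eq_nil_iff.mpr (fun i hi => by simp [hplow i (List.mem_range.mp hi)])
      have h2 : (List.range j₀).filter q = [] :=
        List.filter_eq_nil_iff.mpr (fun i hi => by simp [hlow i (le_of_lt (List.mem_range.mp hi))])
      simp [h1, h2, List.filter, hp, hlow j₀ le_rfl]

theorem pvOcc_cons (cs w : List Char) (k j₀ : Nat) (hk : k ≤ j₀) (hn : j₀ < cs.length)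
    (hm : w <+: cs.drop j₀) (hmin : ∀ i, k ≤ i → i < j₀ → ¬ w <+: cs.drop i) :
    pvOcc cs w k = j₀ :: pvOcc cs w (j₀ + 1) := by
  unfold pvOcc
  apply pvFilterCons _ _ _ _ hn
  · intro i hi
    have h1 : decide (k ≤ i) = true := by simp; omega
    have h2 : decide (j₀ + 1 ≤ i) = true := by simp; omega
    rw [h1, h2]
  · simp [pvMatch, hk, hm]
  · intro i hi
    simp only [Bool.and_eq_false_iff]
    left; simp; omega
  · intro i hi
    simp only [Bool.and_eq_false_iff]
    by_cases hki : k ≤ i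
    · right; simp only [pvMatch, decide_eq_false_iff_not]; exact hmin i hki hi
    · left; simp; omega

theorem pvLoopB_eq (cs w : List Char) (d : Int) :
    ∀ (m k : Nat), cs.length - k ≤ m → k ≤ cs.length →
    ∀ best, pvLoopB cs w d best (pvOptPos (PySem.Chars.findFrom cs w (k : Int))) =
      (pvOcc cs w k).foldl (pvStep w d) best := by
  intro m
  induction m with
  | zero =>
    intro k hm hk best
    by_cases hr : PySem.Chars.findFrom cs w (k : Int) = -1
    · rw [hr]
      have hno := (PySem.Chars.findFrom_natCast_eq_neg_one_iff cs w k hk).mp hr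
      rw [pvOcc_nil cs w k (fun i hki hi hp => hno (pvPrefix_drop_infix cs w k i hki hp))]
      simp [pvOptPos, pvLoopB]
    · have hspec := PySem.Chars.findFrom_natCast_spec cs w k hk hr
      have hk0 : k = cs.length := by omega
      have hge : ¬ ((PySem.Chars.findFrom cs w (k : Int)).toNat < cs.length) := by omega
      rw [pvOcc_nil cs w k (fun i hki hi _ => by omega)]
      simp only [pvOptPos, if_neg hr, pvLoopB, dif_neg hge, List.foldl_nil]
  | succ m ih =>
    intro k hm hk best
    by_cases hr : PySem.Chars.findFrom cs w (k : Int) = -1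
    · rw [hr]
      have hno := (PySem.Chars.findFrom_natCast_eq_neg_one_iff cs w k hk).mp hr
      rw [pvOcc_nil cs w k (fun i hki hi hp => hno (pvPrefix_drop_infix cs w k i hki hp))]
      simp [pvOptPos, pvLoopB]
    · have hspec := PySem.Chars.findFrom_natCast_spec cs w k hk hr
      obtain ⟨hge, hpre, hmin⟩ := hspec
      set r := PySem.Chars.findFrom cs w (k : Int) with hrdef
      have hkr : k ≤ r.toNat := by omega
      by_cases hlt : r.toNat < cs.length
      · have hocc := pvOcc_cons cs w k r.toNat hkr hlt hpre
          (fun i hki hi hp => hmin i hki hi hp)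
        rw [hocc, List.foldl_cons]
        have hcast : ((r.toNat : Int) + 1) = ((r.toNat + 1 : Nat) : Int) := by push_cast; ring
        have := ih (r.toNat + 1) (by omega) (by omega) (pvStep w d best r.toNat)
        simp only [pvOptPos, if_neg hr, pvLoopB, dif_pos hlt, hcast]
        exact this
      · rw [pvOcc_nil cs w k (fun i hki hi hp => hmin i hki (by omega) hp)]
        simp only [pvOptPos, if_neg hr, pvLoopB, dif_neg hlt, List.foldl_nil]

theorem pvWordB_eq (cs : List Char) (best : PySem.Dict Int (Int × Int × Int)) (p : String × Int) :
    pvWordB cs best p = (pvOcc cs p.1.toList 0).foldl (pvStep p.1.toList p.2) best := by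
  unfold pvWordB
  rw [← PySem.Chars.findFrom_zero]
  exact_mod_cast pvLoopB_eq cs p.1.toList p.2 cs.length 0 (by omega) (by omega) best

theorem pvCond_iff (cs w : List Char) (x : Int) :
    (∃ j ∈ pvOcc cs w 0, (j : Int) = x) ↔
      (0 ≤ x ∧ x < (cs.length : Int) ∧ pvMatch cs w x.toNat = true) := by
  constructor
  · rintro ⟨j, hj, rfl⟩
    simp only [pvOcc, List.mem_filter, List.mem_range, Bool.and_eq_true] at hj
    refine ⟨by positivity, by exact_mod_cast hj.1, by simpa using hj.2.2⟩
  · rintro ⟨h0, hlt, hm⟩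
    refine ⟨x.toNat, ?_, by omega⟩
    simp only [pvOcc, List.mem_filter, List.mem_range, Bool.and_eq_true]
    exact ⟨by omega, by simp, hm⟩

theorem pvBig_get?_aux (cs : List Char) (l : List (String × Int)) (x : Int) :
    ∀ best, (l.foldl (pvWordB cs) best).get? x =
      match best.get? x with
      | some v => some v
      | none => pvLook cs l x := by
  induction l with
  | nil =>
    intro best
    cases h : best.get? x <;> simp [h, pvLook]
  | cons p rest ih =>
    intro best
    obtain ⟨word, digit⟩ := p
    rw [List.foldl_cons, ih, pvWordB_eq, pvFoldStep_get?]
    cases h : best.get? x with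
    | some v => simp
    | none =>
      simp only []
      by_cases hc : (∃ j ∈ pvOcc cs word.toList 0, (j : Int) = x)
      · rw [if_pos hc]
        have := (pvCond_iff cs word.toList x).mp hc
        simp only [pvLook, List.find?_cons]
        have hb : (decide (0 ≤ x) && decide (x < (cs.length : Int)) && pvMatch cs word.toList x.toNat) = true := by
          simp only [Bool.and_eq_true, decide_eq_true_iff]
          exact ⟨⟨this.1, this.2.1⟩, this.2.2⟩
        rw [hb]
        simp
      · rw [if_neg hc]
        have hb : (decide (0 ≤ x) && decide (x < (cs.length : Int)) && pvMatch cs word.toList x.toNat) = false := by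
          by_contra hbb
          simp only [Bool.not_eq_false, Bool.and_eq_true, decide_eq_true_iff] at hbb
          exact hc ((pvCond_iff cs word.toList x).mpr ⟨hbb.1.1, hbb.1.2, hbb.2⟩)
        simp only [pvLook, List.find?_cons, hb]

theorem pvBig_get? (cs : List Char) (l : List (String × Int)) (x : Int) :
    (l.foldl (pvWordB cs) PySem.Dict.empty).get? x = pvLook cs l x := by
  rw [pvBig_get?_aux, PySem.Dict.get?_empty]

theorem pvBig_nodup (cs : List Char) (l : List (String × Int)) :
    (l.foldl (pvWordB cs) PySem.Dict.empty).keys.Nodup := by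
  suffices h : ∀ best : PySem.Dict Int (Int × Int × Int), best.keys.Nodup →
      (l.foldl (pvWordB cs) best).keys.Nodup from
    h _ PySem.Dict.nodup_keys_empty
  induction l with
  | nil => exact fun best h => h
  | cons p rest ih =>
    intro best h
    rw [List.foldl_cons, pvWordB_eq]
    exact ih _ (pvFoldStep_nodup _ _ _ _ h)

-- flatMap of option singletons = map over the isSome filter
theorem pvFlatMap_filter {β : Type} (o : Nat → Option β) (junk : β) (is : List Nat) :
    is.flatMap (fun i => (o i).toList) =
      (is.filter (fun i => (o i).isSome)).map (fun i => (o i).getD junk) := by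
  induction is with
  | nil => simp
  | cons i rest ih =>
    cases h : o i <;> simp [List.flatMap_cons, h, ih]

theorem pvLook_natCast (cs : List Char) (l : List (String × Int)) (i : Nat) (hi : i < cs.length) :
    pvLook cs l (i : Int) = (pvFirst cs l i).map (pvTriple i) := by
  unfold pvLook pvFirst pvTriple
  have h1 : ∀ p : String × Int,
      (decide (0 ≤ (i : Int)) && decide ((i : Int) < (cs.length : Int)) && pvMatch cs p.1.toList ((i : Int)).toNat)
        = pvMatch cs p.1.toList i := by
    intro p
    simp
    exact fun _ => hi
  rw [show (fun p : String × Int => decide (0 ≤ (i : Int)) && decide ((i : Int) < (cs.length : Int)) && pvMatch cs p.1.toList ((i : Int)).toNat)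
      = (fun p : String × Int => pvMatch cs p.1.toList i) from funext h1]

theorem pvIdx_mem (cs : List Char) (l : List (String × Int)) (i : Nat) :
    i ∈ pvIdx cs l ↔ i < cs.length ∧ (pvFirst cs l i).isSome := by
  simp [pvIdx, List.mem_filter, List.mem_range]

theorem pvFirst_val (cs : List Char) (l : List (String × Int)) (i : Nat) (junk : Int × Int × Int)
    (h : (pvFirst cs l i).isSome = true) :
    (((pvFirst cs l i).map (pvTriple i)).getD junk).1 = (i : Int) := by
  obtain ⟨p, hp⟩ := Option.isSome_iff_exists.mp h
  simp [hp, pvTriple]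

theorem pvMain (s : String) (dm : List (String × Int)) :
    find_spelled_out_numbers s dm = find_spelled_out_numbers_alt s dm := by
  rw [pvA_eq]
  unfold find_spelled_out_numbers_alt
  set cs := s.toList with hcs
  set l := (PySem.Dict.ofList dm).items with hl
  set D := l.foldl (pvWordB cs) PySem.Dict.empty with hD
  set junk : Int × Int × Int := (0, 0, 0) with hjunk
  have hnd : D.keys.Nodup := pvBig_nodup cs l
  have hvals : D.values = D.keys.map (fun k => D.getD k junk) :=
    PySem.Dict.values_eq_map_keys D hnd junk
  have hIdxNodup : ((pvIdx cs l).map (fun i : Nat => (i : Int))).Nodup :=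
    ((List.nodup_range).filter _).map (fun a b h => by exact_mod_cast h)
  have hmemkeys : ∀ x : Int, x ∈ D.keys ↔ (pvLook cs l x).isSome = true := by
    intro x
    rw [← not_iff_not, ← PySem.Dict.get?_eq_none_iff_not_mem_keys, pvBig_get?]
    simp
  have hmemIdx : ∀ x : Int, x ∈ (pvIdx cs l).map (fun i : Nat => (i : Int)) ↔ (pvLook cs l x).isSome = true := by
    intro x
    constructor
    · intro hx
      obtain ⟨i, hi, rfl⟩ := List.mem_map.mp hx
      obtain ⟨hlen, hsome⟩ := (pvIdx_mem cs l i).mp hi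
      rw [pvLook_natCast cs l i hlen]
      simpa using hsome
    · intro hx
      obtain ⟨v, hv⟩ := Option.isSome_iff_exists.mp hx
      obtain ⟨p, hp, hpv⟩ := Option.map_eq_some_iff.mp hv
      have hpred := List.find?_some hp
      simp only [Bool.and_eq_true, decide_eq_true_iff] at hpred
      obtain ⟨⟨h0, hlt⟩, hm⟩ := hpred
      have hlen : x.toNat < cs.length := by omega
      refine List.mem_map.mpr ⟨x.toNat, (pvIdx_mem cs l x.toNat).mpr ⟨hlen, ?_⟩, by omega⟩
      unfold pvFirst
      rcases hf : l.find? (fun p => pvMatch cs p.1.toList x.toNat) with _ | q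
      · exfalso
        have := List.find?_eq_none.mp hf p (List.mem_of_find?_eq_some hp)
        exact this hm
      · simp [hf]
  have hperm : D.keys.Perm ((pvIdx cs l).map (fun i : Nat => (i : Int))) :=
    (List.perm_ext_iff_of_nodup hnd hIdxNodup).mpr
      (fun x => (hmemkeys x).trans (hmemIdx x).symm)
  have hvalsPerm : D.values.Perm ((pvIdx cs l).map (fun i : Nat => D.getD (i : Int) junk)) := by
    rw [hvals]
    have := hperm.map (fun k => D.getD k junk)
    simpa [List.map_map, Function.comp] using this
  have hA : pvAList cs l =
      (pvIdx cs l).map (fun i : Nat => ((pvFirst cs l i).map (pvTriple i)).getD junk) := by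
    unfold pvAList pvIdx
    rw [pvFlatMap_filter (fun i => (pvFirst cs l i).map (pvTriple i)) junk]
    congr 1
    apply List.filter_congr
    intro i _
    simp
  have hAg : ∀ i ∈ pvIdx cs l,
      ((pvFirst cs l i).map (pvTriple i)).getD junk = D.getD (i : Int) junk := by
    intro i hi
    obtain ⟨hlen, hsome⟩ := (pvIdx_mem cs l i).mp hi
    rw [PySem.Dict.getD_eq_get?_getD, pvBig_get?, pvLook_natCast cs l i hlen]
  have hA2 : pvAList cs l = (pvIdx cs l).map (fun i : Nat => D.getD (i : Int) junk) :=
    hA.trans (List.map_congr_left hAg)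
  have hpw : (pvAList cs l).Pairwise (fun a b => a.1 < b.1) := by
    rw [hA, List.pairwise_map]
    have hIdxPw : (pvIdx cs l).Pairwise (· < ·) := List.pairwise_lt_range.filter _
    apply hIdxPw.imp_of_mem
    intro a b ha hb hab
    rw [pvFirst_val cs l a junk ((pvIdx_mem cs l a).mp ha).2,
        pvFirst_val cs l b junk ((pvIdx_mem cs l b).mp hb).2]
    exact_mod_cast hab
  exact (PySem.List.sorted_eq_of_perm_of_pairwise_lt D.values (pvAList cs l)
    (fun t => t.1) (by rw [hA2]; exact hvalsPerm.symm) hpw).symm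

-- ===== VERDICT (by name: the statement is the Claim_ definition above) =====
theorem find_spelled_out_numbers_spec : Claim_equal_find_spelled_out_numbers := by
  intro s dm _
  unfold Spec_find_spelled_out_numbers
  exact pvMain s dm
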